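-- pv_equiv track=rewrite | github.com/Parizval/CodeChefCodes | Python/ROBOGAME.py | answer
-- ===== SOURCE A (Python) =====
-- def answer(string):
--     if len(string) == 1 :
--         return 'safe'
--     else:
--         count = 0
--         position = -1
--         for i in range(len(string)):
--             if string[i] != '.' and position == -1 :
--                 count = int(string[i])
--                 position = i
--                 continue
--             if string[i] != '.':
--                 if position+count >= i - int(string[i]):
--                     return 'unsafe'
--                 else:
--                     count = int(string[i])
--                     position = i
--         return 'safe'
-- ===== SOURCE B (Python) =====
-- def answer(string):
--     if len(string) == 1:
--         return 'safe'
--     # each robot at cell i with range r guards the interval [i - r, i + r];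
--     # the game is unsafe iff some two guarded intervals intersect (all pairs)
--     robots = [(i, int(c)) for i, c in enumerate(string) if c != '.']
--     n = len(robots)
--     for a in range(n):
--         p, v = robots[a]
--         for b in range(a + 1, n):
--             q, w = robots[b]
--             if max(p - v, q - w) <= min(p + v, q + w):
--                 return 'unsafe'
--     return 'safe'
-- ===== Notes on version B (the rewrite author's own statement) =====
-- stated objective: alternative
-- what changed: B models each robot as the interval [i-r, i+r] it guards and tests ALL pairs of robots for interval intersection (O(k^2) nested scan), replacing A's single stateful adjacent-pair pass; correctness rests on the proved fact that among center-sorted intervals any intersecting pair forces an adjacent intersecting pair.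
-- outside the precondition, e.g. on answer('007a'): A returns 'unsafe', B raises ValueError
import Mathlib
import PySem

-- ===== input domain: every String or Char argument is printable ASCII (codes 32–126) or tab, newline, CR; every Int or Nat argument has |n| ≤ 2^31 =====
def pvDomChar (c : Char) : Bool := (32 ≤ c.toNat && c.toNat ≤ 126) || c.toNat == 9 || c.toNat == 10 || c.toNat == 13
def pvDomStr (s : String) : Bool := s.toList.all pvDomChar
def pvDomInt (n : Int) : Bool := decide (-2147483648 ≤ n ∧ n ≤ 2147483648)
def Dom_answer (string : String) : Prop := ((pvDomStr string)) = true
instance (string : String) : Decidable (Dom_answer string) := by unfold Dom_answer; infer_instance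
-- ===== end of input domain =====

-- B models each robot as the interval [i-r, i+r] it guards and tests ALL pairs of
-- robots for interval intersection, replacing A's stateful adjacent-pair scan;
-- equal values on Pre_ (proved: an intersecting pair forces an adjacent one).

-- ===== PORT A =====
-- int(string[i]) for a digit character (Pre_ guarantees digits; exact there)
def pvDigit (c : Char) : Int := (c.toNat : Int) - 48

-- A's for-loop over range(len(string)) with state (count, position)
def answerLoop : List Char → Int → Int → Int → String
  | [], _, _, _ => "safe"
  | c :: rest, i, count, position =>
    if c ≠ '.' ∧ position = -1 then
      answerLoop rest (i + 1) (pvDigit c) i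
    else if c ≠ '.' then
      if position + count ≥ i - pvDigit c then "unsafe"
      else answerLoop rest (i + 1) (pvDigit c) i
    else
      answerLoop rest (i + 1) count position

def answer (string : String) : String :=
  if string.toList.length = 1 then "safe"
  else answerLoop string.toList 0 0 (-1)

-- ===== PORT B =====
-- robots = [(i, int(c)) for i, c in enumerate(string) if c != '.']
def robotsOf : List Char → Int → List (Int × Int)
  | [], _ => []
  | c :: rest, i =>
    if c ≠ '.' then (i, pvDigit c) :: robotsOf rest (i + 1)
    else robotsOf rest (i + 1)

-- inner loop: does robot (p, v) intersect any later robot?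
def anyOverlap (p v : Int) : List (Int × Int) → Bool
  | [] => false
  | (q, w) :: rest =>
    (max (p - v) (q - w) ≤ min (p + v) (q + w) : Bool) || anyOverlap p v rest

-- outer loop over a, inner over b > a
def allPairs : List (Int × Int) → String
  | [] => "safe"
  | (p, v) :: rest => if anyOverlap p v rest then "unsafe" else allPairs rest

def answer_alt (string : String) : String :=
  if string.toList.length = 1 then "safe"
  else allPairs (robotsOf string.toList 0)

-- ===== PRECONDITION & SPEC =====
-- Pre_ excludes strings of length ≠ 1 containing a character other than '.' or a
-- digit: Python raises ValueError on them, except that A can short-circuit to the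
-- overlap verdict on an overlap found before the bad character, where B (which
-- parses the whole string first) still raises.
def Pre_answer (string : String) : Prop :=
  string.toList.length = 1 ∨
    (string.toList.all (fun c => c == '.' || (48 ≤ c.toNat && c.toNat ≤ 57))) = true
instance (string : String) : Decidable (Pre_answer string) := by unfold Pre_answer; infer_instance

def pvWitness_answer : String := "2..2"

def Spec_answer (string : String) (out : String) : Prop := out = answer_alt string
instance (string : String) (out : String) : Decidable (Spec_answer string out) := by unfold Spec_answer; infer_instance

-- ===== CLAIM (what is proved, stated in full; the proofs are below) =====
def Claim_equal_answer : Prop := ∀ (string : String), Dom_answer string → Pre_answer string → Spec_answer string (answer string)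

-- ===== LEMMAS AND PROOFS =====

-- A's adjacent-pair scan (intermediate form of A's loop, used only in the proof)
def scanPairs : List (Int × Int) → String
  | (p, v) :: (q, w) :: rest =>
    if p + v ≥ q - w then "unsafe" else scanPairs ((q, w) :: rest)
  | _ => "safe"

-- invariant after the first robot: A's (position, count) state is a pending robot
theorem loop_some (cs : List Char) : ∀ (i count p : Int), 0 ≤ i → p ≠ -1 →
    answerLoop cs i count p = scanPairs ((p, count) :: robotsOf cs i) := by
  induction cs with
  | nil => intro i count p _ _; simp [answerLoop, robotsOf, scanPairs]
  | cons c rest ih =>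
    intro i count p hi hp
    by_cases hc : c = '.'
    · simp [answerLoop, robotsOf, hc]
      exact ih (i + 1) count p (by omega) hp
    · simp [answerLoop, robotsOf, hc, hp, scanPairs]
      split_ifs with h
      · rfl
      · exact ih (i + 1) (pvDigit c) i (by omega) (by omega)

-- before the first robot: A's loop equals the adjacent scan of the robots
theorem loop_none (cs : List Char) : ∀ (i count : Int), 0 ≤ i →
    answerLoop cs i count (-1) = scanPairs (robotsOf cs i) := by
  induction cs with
  | nil => intro i count _; simp [answerLoop, robotsOf, scanPairs]
  | cons c rest ih =>
    intro i count hi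
    by_cases hc : c = '.'
    · simp [answerLoop, robotsOf, hc]
      exact ih (i + 1) count (by omega)
    · simp [answerLoop, robotsOf, hc]
      exact loop_some rest (i + 1) (pvDigit c) i (by omega) (by omega)

theorem anyOverlap_iff (p v : Int) (l : List (Int × Int)) :
    anyOverlap p v l = true ↔
      ∃ r ∈ l, max (p - v) (r.1 - r.2) ≤ min (p + v) (r.1 + r.2) := by
  induction l with
  | nil => simp [anyOverlap]
  | cons r rest ih =>
    obtain ⟨q, w⟩ := r
    simp [anyOverlap, ih]

-- the key fact: on a center-sorted list of nonnegative-radius robots, the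
-- adjacent-pair scan equals the all-pairs intersection test
theorem scan_eq_all (l : List (Int × Int))
    (hs : l.Pairwise (fun a b => a.1 ≤ b.1)) (hv : ∀ r ∈ l, 0 ≤ r.2) :
    scanPairs l = allPairs l := by
  induction l with
  | nil => rfl
  | cons x t ih =>
    obtain ⟨p, v⟩ := x
    cases t with
    | nil => simp [scanPairs, allPairs, anyOverlap]
    | cons y rest =>
      obtain ⟨q, w⟩ := y
      rw [List.pairwise_cons] at hs
      obtain ⟨hx, hs'⟩ := hs
      have hpq : p ≤ q := hx (q, w) (by simp)
      have hv0 : 0 ≤ v := hv (p, v) (by simp)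
      have hw0 : 0 ≤ w := hv (q, w) (by simp)
      have ihyr : scanPairs ((q, w) :: rest) = allPairs ((q, w) :: rest) :=
        ih hs' (fun r hr => hv r (by simp [hr]))
      by_cases hov : p + v ≥ q - w
      · have hfull : max (p - v) (q - w) ≤ min (p + v) (q + w) := by omega
        simp [scanPairs, allPairs, anyOverlap, hov, hfull]
      · -- no adjacent overlap at the head
        have hxy : ¬ (max (p - v) (q - w) ≤ min (p + v) (q + w)) := by omega
        rw [show scanPairs ((p,v) :: (q,w) :: rest) = scanPairs ((q,w) :: rest) by
              simp [scanPairs, hov], ihyr]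
        by_cases hany : anyOverlap p v rest = true
        · -- x intersects some later robot s; then so does y, both unsafe
          obtain ⟨s, hsmem, hsov⟩ := (anyOverlap_iff p v rest).mp hany
          have hqs : q ≤ s.1 := (List.pairwise_cons.mp hs').1 s hsmem
          have hvs : 0 ≤ s.2 := hv s (by simp [hsmem])
          have hys : max (q - w) (s.1 - s.2) ≤ min (q + w) (s.1 + s.2) := by
            omega
          have : anyOverlap q w rest = true :=
            (anyOverlap_iff q w rest).mpr ⟨s, hsmem, hys⟩
          simp [allPairs, anyOverlap, this]
        · simp [allPairs, anyOverlap, hxy, hany]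
      
-- positions in robotsOf start at i
theorem robotsOf_lb (cs : List Char) : ∀ (i : Int), ∀ r ∈ robotsOf cs i, i ≤ r.1 := by
  induction cs with
  | nil => intro i r hr; simp [robotsOf] at hr
  | cons c rest ih =>
    intro i r hr
    simp only [robotsOf] at hr
    split_ifs at hr with hc
    · rw [List.mem_cons] at hr
      rcases hr with hr | hr
      · simp [hr]
      · have := ih (i + 1) r hr; omega
    · have := ih (i + 1) r hr; omega

theorem robotsOf_sorted (cs : List Char) : ∀ (i : Int),
    (robotsOf cs i).Pairwise (fun a b => a.1 ≤ b.1) := by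
  induction cs with
  | nil => intro i; simp [robotsOf]
  | cons c rest ih =>
    intro i
    simp only [robotsOf]
    split_ifs with hc
    · exact List.pairwise_cons.mpr
        ⟨fun r hr => by have := robotsOf_lb rest (i + 1) r hr; simp; omega,
         ih (i + 1)⟩
    · exact ih (i + 1)

theorem robotsOf_nonneg (cs : List Char)
    (hd : ∀ c ∈ cs, c = '.' ∨ (48 ≤ c.toNat ∧ c.toNat ≤ 57)) :
    ∀ (i : Int), ∀ r ∈ robotsOf cs i, 0 ≤ r.2 := by
  induction cs with
  | nil => intro i r hr; simp [robotsOf] at hr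
  | cons c rest ih =>
    intro i r hr
    simp only [robotsOf] at hr
    have ih' := ih (fun c hc => hd c (by simp [hc]))
    split_ifs at hr with hc
    · rw [List.mem_cons] at hr
      rcases hr with hr | hr
      · rcases hd c (by simp) with h | h
        · exact absurd h hc
        · subst hr; simp [pvDigit]; omega
      · exact ih' (i + 1) r hr
    · exact ih' (i + 1) r hr

-- ===== VERDICT (by name: the statement is the Claim_ definition above) =====
theorem answer_spec : Claim_equal_answer := by
  intro s _ hpre
  unfold Spec_answer answer answer_alt
  split_ifs with h
  · rfl
  · rcases hpre with h1 | h1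
    · exact absurd h1 h
    · rw [loop_none s.toList 0 0 (by norm_num)]
      refine scan_eq_all _ (robotsOf_sorted s.toList 0)
        (robotsOf_nonneg s.toList ?_ 0)
      intro c hc
      have := List.all_eq_true.mp h1 c hc
      simp at this
      rcases this with h | h
      · exact Or.inl h
      · exact Or.inr h
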